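-- pv_equiv track=rewrite | github.com/stan-is-hate/wsm_compare | fetch_canonical.py | derive_placement
-- ===== SOURCE A (Python) =====
-- from collections import defaultdict
--
-- def derive_placement(athletes_pts):
--     """Given {athlete: canonical_pts}, return {athlete: placement_string}.
--
--     Athletes with 0 pts → 'DNS'. Athletes with the same pts are tied (T-prefix).
--     """
--     # Group by pts value (ignoring 0)
--     competing = {a: p for a, p in athletes_pts.items() if p > 0}
--     by_pts = defaultdict(list)
--     for a, p in competing.items():
--         by_pts[p].append(a)
--
--     # Sort groups by pts descending (highest pts = best placement)
--     sorted_groups = sorted(by_pts.items(), key=lambda x: -x[0])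
--
--     placements = {}
--     cur_pos = 1
--     for pts, group in sorted_groups:
--         n = len(group)
--         if n == 1:
--             placements[group[0]] = str(cur_pos)
--         else:
--             for a in group:
--                 placements[a] = f"T{cur_pos}"
--         cur_pos += n
--
--     # DNS for athletes with 0 pts
--     for a, p in athletes_pts.items():
--         if p == 0:
--             placements[a] = "DNS"
--
--     return placements
-- ===== SOURCE B (Python) =====
-- def derive_placement(athletes_pts):
--     """Sort competing athletes by points descending (stable), then label maximal
--     runs of equal points in one scan; separate pass assigns DNS for 0 points."""
--     comp = sorted([kv for kv in athletes_pts.items() if kv[1] > 0],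
--                   key=lambda kv: -kv[1])
--     placements = {}
--     pos = 1
--     while comp:
--         a0, p0 = comp[0]
--         rest = comp[1:]
--         run = []
--         while rest and rest[0][1] == p0:
--             run.append(rest[0])
--             rest = rest[1:]
--         label = str(pos) if not run else "T" + str(pos)
--         placements[a0] = label
--         for a, _ in run:
--             placements[a] = label
--         pos += 1 + len(run)
--         comp = rest
--     for a, p in athletes_pts.items():
--         if p == 0:
--             placements[a] = "DNS"
--     return placements
-- ===== Notes on version B (the rewrite author's own statement) =====
-- stated objective: simpler
-- what changed: B drops A's defaultdict grouping index and the sort of (pts, group) pairs: it stably sorts the competing items themselves by points descending and assigns labels in one scan over maximal runs of equal points.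
import Mathlib
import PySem

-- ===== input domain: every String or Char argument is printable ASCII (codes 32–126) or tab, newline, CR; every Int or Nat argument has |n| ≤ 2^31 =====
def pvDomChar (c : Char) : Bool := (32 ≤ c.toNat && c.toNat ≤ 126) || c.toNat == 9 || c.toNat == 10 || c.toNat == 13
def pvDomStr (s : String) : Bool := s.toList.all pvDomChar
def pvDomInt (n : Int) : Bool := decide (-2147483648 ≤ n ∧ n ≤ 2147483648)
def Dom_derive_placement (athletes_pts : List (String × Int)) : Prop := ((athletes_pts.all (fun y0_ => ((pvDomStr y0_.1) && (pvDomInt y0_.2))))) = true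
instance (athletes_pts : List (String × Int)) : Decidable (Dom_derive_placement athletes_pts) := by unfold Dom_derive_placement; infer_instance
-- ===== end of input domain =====

-- B replaces A's defaultdict grouping + sort of (pts, group) pairs by a stable sort of the
-- competing items themselves (points descending) followed by one scan over maximal runs of
-- equal points (objective: simpler).


-- ===== PORT A =====
def derive_placement (athletes_pts : List (String × Int)) : List (String × String) :=
  -- competing = {a: p for a, p in athletes_pts.items() if p > 0}
  let competing : PySem.Dict String Int :=
    athletes_pts.foldl (fun d ap => if 0 < ap.2 then d.insert ap.1 ap.2 else d) PySem.Dict.empty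
  -- by_pts = defaultdict(list); for a, p in competing.items(): by_pts[p].append(a)
  let by_pts : PySem.Dict Int (List String) :=
    competing.items.foldl (fun d ap => d.modify ap.2 [] (fun g => g ++ [ap.1])) PySem.Dict.empty
  -- sorted_groups = sorted(by_pts.items(), key=lambda x: -x[0])
  let sorted_groups := PySem.List.sorted by_pts.items (fun x => -x.1) false
  -- placements = {}; cur_pos = 1; for pts, group in sorted_groups: …
  let st : PySem.Dict String String × Int :=
    sorted_groups.foldl
      (fun st pg =>
        let n := pg.2.length
        if n = 1 then
          -- group[0] is always in range (groups are built non-empty); pyGetD is the total form of group[0]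
          (st.1.insert (PySem.List.pyGetD pg.2 0 "") (PySem.Int.toStr st.2), st.2 + (n : Int))
        else
          (pg.2.foldl (fun dd a => dd.insert a ("T" ++ PySem.Int.toStr st.2)) st.1, st.2 + (n : Int)))
      (PySem.Dict.empty, 1)
  -- for a, p in athletes_pts.items(): if p == 0: placements[a] = "DNS"
  let placements :=
    athletes_pts.foldl (fun d ap => if ap.2 == 0 then d.insert ap.1 "DNS" else d) st.1
  placements.items

-- ===== PORT B =====
-- the outer while loop of Source B: peel one maximal run of equal points off the sorted list
def dpRun (comp : List (String × Int)) (placements : PySem.Dict String String) (pos : Int) :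
    PySem.Dict String String :=
  match comp with
  | [] => placements
  | (a0, p0) :: rest =>
    -- inner while: run = maximal prefix of rest with the same points
    let run := rest.takeWhile (fun q => q.2 == p0)
    let rest' := rest.dropWhile (fun q => q.2 == p0)
    let label := if run.isEmpty then PySem.Int.toStr pos else "T" ++ PySem.Int.toStr pos
    let placements' := run.foldl (fun d q => d.insert q.1 label) (placements.insert a0 label)
    dpRun rest' placements' (pos + 1 + (run.length : Int))
termination_by comp.length
decreasing_by
  simp only [List.length_cons]
  exact Nat.lt_succ_of_le (List.length_dropWhile_le _ _)

def derive_placement_alt (athletes_pts : List (String × Int)) : List (String × String) :=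
  -- comp = sorted([kv for kv in athletes_pts.items() if kv[1] > 0], key=lambda kv: -kv[1])
  let comp := PySem.List.sorted (athletes_pts.filter (fun kv => decide (0 < kv.2))) (fun kv => -kv.2) false
  let placements := dpRun comp PySem.Dict.empty 1
  -- for a, p in athletes_pts.items(): if p == 0: placements[a] = "DNS"
  (athletes_pts.foldl (fun d ap => if ap.2 == 0 then d.insert ap.1 "DNS" else d) placements).items

-- ===== PRECONDITION & SPEC =====
-- Pre_ excludes only association lists with duplicate keys: the Python argument is a dict,
-- whose keys are necessarily distinct, so such lists correspond to no actual input of A.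
def Pre_derive_placement (athletes_pts : List (String × Int)) : Prop :=
  (athletes_pts.map Prod.fst).Nodup
instance (athletes_pts : List (String × Int)) : Decidable (Pre_derive_placement athletes_pts) := by
  unfold Pre_derive_placement; infer_instance

def pvWitness_derive_placement : (List (String × Int)) :=
  [("ann", 3), ("bob", 0), ("cat", -1), ("dan", 3), ("eve", 5)]

def Spec_derive_placement (athletes_pts : List (String × Int)) (out : List (String × String)) : Prop := out = derive_placement_alt athletes_pts
instance (athletes_pts : List (String × Int)) (out : List (String × String)) : Decidable (Spec_derive_placement athletes_pts out) := by unfold Spec_derive_placement; infer_instance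

-- ===== CLAIM (what is proved, stated in full; the proofs are below) =====
def Claim_equal_derive_placement : Prop := ∀ (athletes_pts : List (String × Int)), Dom_derive_placement athletes_pts → Pre_derive_placement athletes_pts → Spec_derive_placement athletes_pts (derive_placement athletes_pts)

-- ===== LEMMAS AND PROOFS =====

-- the concatenation, for each points value of D in order, of the items of xs with those points
def pvBlocks (D : List Int) (xs : List (String × Int)) : List (String × Int) :=
  D.flatMap (fun p => xs.filter (fun kv => kv.2 == p))

-- insertBy inserts x before the first element the comparison puts it before
theorem pv_insertBy_eq {α : Type} (bef : α → α → Bool) (x : α) (l : List α) :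
    PySem.List.insertBy bef x l
      = l.takeWhile (fun y => !bef x y) ++ x :: l.dropWhile (fun y => !bef x y) := by
  induction l with
  | nil => simp [PySem.List.insertBy]
  | cons y ys ih =>
    by_cases h : bef x y
    · simp [PySem.List.insertBy, h]
    · simp [PySem.List.insertBy, h, ih]

theorem pv_takeWhile_all_append {α : Type} (P : α → Bool) (u v : List α)
    (h : ∀ y ∈ u, P y = true) :
    (u ++ v).takeWhile P = u ++ v.takeWhile P ∧ (u ++ v).dropWhile P = v.dropWhile P := by
  induction u with
  | nil => simp
  | cons y ys ih =>
    have hy := h y List.mem_cons_self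
    have ih' := ih (fun z hz => h z (List.mem_cons_of_mem _ hz))
    simp [hy, ih'.1, ih'.2]

-- takeWhile/dropWhile through a block list: blocks that hold everywhere are taken, and a
-- following block list whose first block is non-empty and fails everywhere stops the scan
theorem pv_takeWhile_blocks (P : (String × Int) → Bool) (D1 D2 : List Int) (xs : List (String × Int))
    (h1 : ∀ k ∈ D1, ∀ y ∈ xs, y.2 = k → P y = true)
    (h2 : ∀ k ∈ D2, (xs.filter (fun kv => kv.2 == k)) ≠ [] ∧ ∀ y ∈ xs, y.2 = k → P y = false) :
    (pvBlocks (D1 ++ D2) xs).takeWhile P = pvBlocks D1 xs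
      ∧ (pvBlocks (D1 ++ D2) xs).dropWhile P = pvBlocks D2 xs := by
  induction D1 with
  | nil =>
    simp only [List.nil_append, pvBlocks, List.flatMap_nil]
    cases D2 with
    | nil => simp
    | cons k ks =>
      obtain ⟨hne, hall⟩ := h2 k (List.mem_cons_self)
      obtain ⟨y, ys, hy⟩ := List.exists_cons_of_ne_nil hne
      have hyP : P y = false := by
        have : y ∈ xs.filter (fun kv => kv.2 == k) := by rw [hy]; exact List.mem_cons_self
        have hmem := List.mem_filter.mp this
        exact hall y hmem.1 (by simpa using hmem.2)
      rw [List.flatMap_cons, hy]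
      constructor
      · simp [hyP]
      · simp [hyP]
  | cons k ks ih =>
    have hkall : ∀ y ∈ xs.filter (fun kv => kv.2 == k), P y = true := by
      intro y hy
      have hmem := List.mem_filter.mp hy
      exact h1 k List.mem_cons_self y hmem.1 (by simpa using hmem.2)
    have ih' := ih (fun j hj => h1 j (List.mem_cons_of_mem _ hj))
    simp only [pvBlocks, List.cons_append, List.flatMap_cons] at *
    have htw := pv_takeWhile_all_append P (xs.filter (fun kv => kv.2 == k))
      (List.flatMap (fun p => List.filter (fun kv => kv.2 == p) xs) (ks ++ D2)) hkall
    exact ⟨by rw [htw.1, ih'.1], by rw [htw.2, ih'.2]⟩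

-- sorting distinct Ints by the key -p is strictly descending
theorem pv_sorted_desc (K : List Int) (h : K.Nodup) :
    (PySem.List.sorted K (fun p => -p) false).Pairwise (fun a b => b < a) := by
  have h1 := PySem.List.sorted_pairwise K (fun p => -p)
  have h2 : (PySem.List.sorted K (fun p => -p) false).Nodup :=
    ((PySem.List.sorted_perm K (fun p => -p) false).nodup_iff).mpr h
  exact (h1.and h2).imp (fun {a b} hab => by
    obtain ⟨hle, hne⟩ := hab; omega)

theorem pv_dropWhile_head_false {α : Type} (p : α → Bool) (l : List α) (y : α) (ys : List α)
    (h : l.dropWhile p = y :: ys) : p y = false := by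
  induction l with
  | nil => simp at h
  | cons z zs ih =>
    rw [List.dropWhile_cons] at h
    by_cases hz : p z
    · rw [if_pos hz] at h; exact ih h
    · rw [if_neg hz] at h
      cases h
      simpa using hz

-- an item whose points value occurs in no block leaves every block unchanged
theorem pv_blocks_no_x (D : List Int) (xs : List (String × Int)) (x : String × Int)
    (h : ∀ k ∈ D, k ≠ x.2) :
    pvBlocks D (xs ++ [x]) = pvBlocks D xs := by
  induction D with
  | nil => rfl
  | cons k ks ihD =>
    have hk := h k List.mem_cons_self
    have h' := fun j hj => h j (List.mem_cons_of_mem _ hj)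
    simp only [pvBlocks, List.flatMap_cons] at *
    rw [ihD h', List.filter_append]
    have : List.filter (fun kv => kv.2 == k) [x] = [] := by
      have : (x.2 == k) = false := beq_eq_false_iff_ne.mpr (Ne.symm hk)
      simp [List.filter, this]
    rw [this, List.append_nil]

-- STABILITY: the stable sort by points descending is the concatenation of the groups of
-- equal points, taken in descending order of the distinct points values
theorem pv_sorted_eq_blocks (xs : List (String × Int)) :
    PySem.List.sorted xs (fun kv => -kv.2) false
      = pvBlocks (PySem.List.sorted (PySem.Set.ofList (xs.map Prod.snd)) (fun p => -p) false) xs := by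
  induction xs using List.reverseRecOn with
  | nil => simp [pvBlocks, PySem.List.sorted, PySem.Set.ofList]
  | append_singleton xs x ih =>
    have hKnd : (PySem.Set.ofList (xs.map Prod.snd) : List Int).Nodup := PySem.Set.nodup_ofList _
    set K : List Int := PySem.Set.ofList (xs.map Prod.snd) with hK
    set D : List Int := PySem.List.sorted K (fun p => -p) false with hD
    have hDdesc : D.Pairwise (fun a b => b < a) := pv_sorted_desc K hKnd
    have hmemD : ∀ k : Int, k ∈ D ↔ k ∈ K := fun k => PySem.List.mem_sorted K (fun p => -p) false k
    have hfilne : ∀ k ∈ K, xs.filter (fun kv => kv.2 == k) ≠ [] := by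
      intro k hk
      have : k ∈ xs.map Prod.snd := (PySem.Set.mem_ofList _ _).mp hk
      obtain ⟨kv, hkv, hsnd⟩ := List.mem_map.mp this
      exact List.ne_nil_of_mem (List.mem_filter.mpr ⟨hkv, by simp [hsnd]⟩)
    have hL : PySem.List.sorted (xs ++ [x]) (fun kv => -kv.2) false
        = PySem.List.insertBy (fun a b => decide (-a.2 < -b.2)) x
            (PySem.List.sorted xs (fun kv => -kv.2) false) := by
      rw [PySem.List.sorted_eq_foldl_insertBy (xs ++ [x]), List.foldl_append,
        List.foldl_cons, List.foldl_nil, ← PySem.List.sorted_eq_foldl_insertBy]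
    have hK' : (PySem.Set.ofList ((xs ++ [x]).map Prod.snd) : List Int) = PySem.Set.add K x.2 := by
      simp only [List.map_append, List.map_cons, List.map_nil]
      exact PySem.Set.ofList_append_singleton _ _
    rw [hL, ih, pv_insertBy_eq]
    by_cases hp : x.2 ∈ K
    · -- points value already present: D is unchanged, x is appended to its block
      have hxD : x.2 ∈ D := (hmemD _).mpr hp
      obtain ⟨s, t, hst⟩ := List.append_of_mem hxD
      have hpa := List.pairwise_append.mp (hst ▸ hDdesc)
      have hs : ∀ a ∈ s, x.2 < a := fun a ha => hpa.2.2 a ha x.2 List.mem_cons_self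
      have ht : ∀ b ∈ t, b < x.2 := (List.pairwise_cons.mp hpa.2.1).1
      have hblocks : pvBlocks D xs = pvBlocks ((s ++ [x.2]) ++ t) xs := by
        rw [hst, List.append_cons]
      have htb := pv_takeWhile_blocks (fun y => !decide (-x.2 < -y.2)) (s ++ [x.2]) t xs
        (by
          intro k hk y hy hy2
          rcases List.mem_append.mp hk with hks | hkx
          · have := hs k hks
            simp only [Bool.not_eq_true', decide_eq_false_iff_not]
            omega
          · have : k = x.2 := by simpa using hkx
            simp only [Bool.not_eq_true', decide_eq_false_iff_not]
            omega)
        (by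
          intro k hk
          refine ⟨hfilne k ((hmemD k).mp (by rw [hst]; exact List.mem_append_right _ (List.mem_cons_of_mem _ hk))), ?_⟩
          intro y hy hy2
          have := ht k hk
          simp only [Bool.not_eq_false', decide_eq_true_iff]
          omega)
      rw [hblocks, htb.1, htb.2]
      rw [hK', PySem.Set.add_of_mem hp, ← hD, hst]
      have hsne : ∀ k ∈ s, k ≠ x.2 := fun k hk => ne_of_gt (hs k hk)
      have htne : ∀ k ∈ t, k ≠ x.2 := fun k hk => ne_of_lt (ht k hk)
      simp only [pvBlocks, List.flatMap_append, List.flatMap_cons,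
        List.flatMap_nil, List.append_nil]
      rw [show List.flatMap (fun p => List.filter (fun kv => kv.2 == p) (xs ++ [x])) s
            = List.flatMap (fun p => List.filter (fun kv => kv.2 == p) xs) s from pv_blocks_no_x s xs x hsne,
          show List.flatMap (fun p => List.filter (fun kv => kv.2 == p) (xs ++ [x])) t
            = List.flatMap (fun p => List.filter (fun kv => kv.2 == p) xs) t from pv_blocks_no_x t xs x htne]
      rw [List.filter_append]
      have hfx : List.filter (fun kv => kv.2 == x.2) [x] = [x] := by simp
      rw [hfx]
      simp [List.append_assoc]
    · -- fresh points value: x.2 is inserted into D and forms its own one-element block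
      have hxK : x.2 ∉ xs.map Prod.snd := fun hmem => hp ((PySem.Set.mem_ofList _ _).mpr hmem)
      have hD' : PySem.List.sorted (K ++ [x.2]) (fun p => -p) false
          = PySem.List.insertBy (fun a b => decide (-a < -b)) x.2 D := by
        rw [PySem.List.sorted_eq_foldl_insertBy (K ++ [x.2]), List.foldl_append,
          List.foldl_cons, List.foldl_nil, ← PySem.List.sorted_eq_foldl_insertBy, hD]
      set s : List Int := D.takeWhile (fun k => !decide (-x.2 < -k)) with hsdef
      set t : List Int := D.dropWhile (fun k => !decide (-x.2 < -k)) with htdef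
      have hst : s ++ t = D := List.takeWhile_append_dropWhile
      have hs : ∀ k ∈ s, x.2 < k := by
        intro k hk
        have h1 := List.mem_takeWhile_imp hk
        have h2 : k ∈ K := (hmemD k).mp ((List.takeWhile_sublist _).subset hk)
        have h3 : k ≠ x.2 := fun he => hp (he ▸ h2)
        simp only [Bool.not_eq_true', decide_eq_false_iff_not] at h1
        omega
      have ht : ∀ k ∈ t, k < x.2 := by
        intro k hk
        have hDt : t.Pairwise (fun a b => b < a) := (List.pairwise_append.mp (by rwa [hst])).2.1
        cases htt : t with
        | nil => rw [htt] at hk; cases hk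
        | cons k0 t' =>
          have hh : (fun k => !decide (-x.2 < -k)) k0 = false :=
            pv_dropWhile_head_false _ D k0 t' (by rw [htdef] at htt; exact htt)
          simp only [Bool.not_eq_false', decide_eq_true_iff] at hh
          rw [htt] at hk hDt
          rcases List.mem_cons.mp hk with rfl | hk'
          · omega
          · have := (List.pairwise_cons.mp hDt).1 k hk'
            omega
      have htb := pv_takeWhile_blocks (fun y => !decide (-x.2 < -y.2)) s t xs
        (by
          intro k hk y hy hy2
          have := hs k hk
          simp only [Bool.not_eq_true', decide_eq_false_iff_not]
          omega)
        (by
          intro k hk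
          refine ⟨hfilne k ((hmemD k).mp (by rw [← hst]; exact List.mem_append_right _ hk)), ?_⟩
          intro y hy hy2
          have := ht k hk
          simp only [Bool.not_eq_false', decide_eq_true_iff]
          omega)
      have hblocks : pvBlocks D xs = pvBlocks (s ++ t) xs := by rw [hst]
      rw [hblocks, htb.1, htb.2]
      rw [hK', PySem.Set.add_of_not_mem hp, hD', pv_insertBy_eq, ← hsdef, ← htdef]
      have hsne : ∀ k ∈ s, k ≠ x.2 := fun k hk => ne_of_gt (hs k hk)
      have htne : ∀ k ∈ t, k ≠ x.2 := fun k hk => ne_of_lt (ht k hk)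
      simp only [pvBlocks, List.flatMap_append, List.flatMap_cons]
      rw [show List.flatMap (fun p => List.filter (fun kv => kv.2 == p) (xs ++ [x])) s
            = List.flatMap (fun p => List.filter (fun kv => kv.2 == p) xs) s from pv_blocks_no_x s xs x hsne,
          show List.flatMap (fun p => List.filter (fun kv => kv.2 == p) (xs ++ [x])) t
            = List.flatMap (fun p => List.filter (fun kv => kv.2 == p) xs) t from pv_blocks_no_x t xs x htne]
      rw [List.filter_append]
      have hfx : List.filter (fun kv => kv.2 == x.2) [x] = [x] := by simp
      have hfnil : List.filter (fun kv => kv.2 == x.2) xs = [] := by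
        rw [List.filter_eq_nil_iff]
        intro a ha hcon
        exact hxK (List.mem_map.mpr ⟨a, ha, by simpa using hcon⟩)
      rw [hfx, hfnil]
      simp

-- A's competing dict (built by conditional insertion of fresh keys) is the filtered list
theorem pv_competing_items (aps : List (String × Int)) (hnd : (aps.map Prod.fst).Nodup) :
    (aps.foldl (fun d ap => if 0 < ap.2 then d.insert ap.1 ap.2 else d) PySem.Dict.empty).items
      = aps.filter (fun kv => decide (0 < kv.2)) := by
  have h1 : (aps.foldl (fun d ap => if 0 < ap.2 then d.insert ap.1 ap.2 else d) PySem.Dict.empty)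
      = (aps.filter (fun kv => decide (0 < kv.2))).foldl (fun d ap => d.insert ap.1 ap.2) PySem.Dict.empty := by
    rw [List.foldl_filter]
    simp
  rw [h1, PySem.Dict.items_foldl_insert_fresh _ Prod.fst Prod.snd _
      (by intro a _; simp [PySem.Dict.contains_empty])
      (hnd.sublist (List.Sublist.map Prod.fst List.filter_sublist))]
  simp [PySem.Dict.empty]

-- A's grouping dict, as an items list: distinct points values paired with their name groups
theorem pv_by_pts_items (C : List (String × Int)) :
    ((C.foldl (fun d ap => d.modify ap.2 [] (fun g => g ++ [ap.1])) PySem.Dict.empty).items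
       : List (Int × List String))
      = (PySem.Set.ofList (C.map Prod.snd)).map
          (fun p => (p, (C.filter (fun kv => kv.2 == p)).map Prod.fst)) := by
  have hk : (C.foldl (fun d ap => d.modify ap.2 [] (fun g => g ++ [ap.1])) PySem.Dict.empty).keys
      = PySem.Set.ofList (C.map Prod.snd) := by
    rw [PySem.Dict.keys_foldl_modify_key C (fun ap => ap.2) [] (fun _ ap g => g ++ [ap.1])]
    simp [PySem.Dict.keys_empty, PySem.Set.update_nil_left]
  have hnd : (C.foldl (fun d ap => d.modify ap.2 [] (fun g => g ++ [ap.1])) PySem.Dict.empty).keys.Nodup := by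
    rw [hk]; exact PySem.Set.nodup_ofList _
  rw [PySem.Dict.items_eq_map_keys _ hnd [], hk]
  refine List.map_congr_left ?_
  intro p hp
  have hg : (C.foldl (fun d ap => d.modify ap.2 [] (fun g => g ++ [ap.1])) PySem.Dict.empty).getD p []
      = (C.filter (fun kv => kv.2 == p)).map Prod.fst := by
    have h2 : (C.foldl (fun d ap => d.modify ap.2 [] (fun g => g ++ [ap.1])) PySem.Dict.empty)
        = (C.map (fun kv => (kv.2, kv.1))).foldl (fun d q => d.modify q.1 [] (fun g => g ++ [q.2])) PySem.Dict.empty := by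
      rw [List.foldl_map]
    rw [h2, PySem.Dict.getD_foldl_modify_append]
    simp [List.filter_map, Function.comp_def]
  rw [hg]

-- sorting the (pts, group) pairs by -pts is the descending sort of the distinct pts, mapped
theorem pv_sorted_groups (C : List (String × Int)) :
    PySem.List.sorted ((PySem.Set.ofList (C.map Prod.snd)).map
        (fun p => (p, (C.filter (fun kv => kv.2 == p)).map Prod.fst))) (fun x => -x.1) false
      = (PySem.List.sorted (PySem.Set.ofList (C.map Prod.snd)) (fun p => -p) false).map
          (fun p => (p, (C.filter (fun kv => kv.2 == p)).map Prod.fst)) := by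
  apply PySem.List.sorted_eq_of_perm_of_pairwise_lt
  · exact (PySem.List.sorted_perm _ _ _).map _
  · rw [List.pairwise_map]
    exact (pv_sorted_desc _ (PySem.Set.nodup_ofList _)).imp (fun {a b} h => by simp; omega)

-- A's loop over the sorted groups computes the same dict as B's run scan over the blocks
theorem pv_fold_groups_eq_dpRun (C : List (String × Int)) (D : List Int)
    (hdesc : D.Pairwise (fun a b => b < a))
    (hne : ∀ p ∈ D, C.filter (fun kv => kv.2 == p) ≠ [])
    (d : PySem.Dict String String) (pos : Int) :
    ((D.map (fun p => (p, (C.filter (fun kv => kv.2 == p)).map Prod.fst))).foldl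
      (fun (st : PySem.Dict String String × Int) pg =>
        let n := pg.2.length
        if n = 1 then (st.1.insert (PySem.List.pyGetD pg.2 0 "") (PySem.Int.toStr st.2), st.2 + (n : Int))
        else (pg.2.foldl (fun dd a => dd.insert a ("T" ++ PySem.Int.toStr st.2)) st.1, st.2 + (n : Int)))
      (d, pos)).1
      = dpRun (pvBlocks D C) d pos := by
  induction D generalizing d pos with
  | nil => simp [pvBlocks, dpRun]
  | cons p D' ihD =>
    obtain ⟨y, g, hy⟩ := List.exists_cons_of_ne_nil (hne p List.mem_cons_self)
    obtain ⟨a0, q⟩ := y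
    have hq : q = p := by
      have : (a0, q) ∈ C.filter (fun kv => kv.2 == p) := by rw [hy]; exact List.mem_cons_self
      simpa using (List.mem_filter.mp this).2
    subst hq
    have hgall : ∀ z ∈ g, (fun w : String × Int => w.2 == q) z = true := by
      intro z hz
      have : z ∈ C.filter (fun kv => kv.2 == q) := by rw [hy]; exact List.mem_cons_of_mem _ hz
      simpa using (List.mem_filter.mp this).2
    have htb := pv_takeWhile_blocks (fun w => w.2 == q) [] D' C
      (by intro k hk; cases hk)
      (by
        intro k hk
        refine ⟨hne k (List.mem_cons_of_mem _ hk), ?_⟩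
        intro z hz hz2
        have hlt : k < q := (List.pairwise_cons.mp hdesc).1 k hk
        simp only [beq_eq_false_iff_ne, ne_eq]
        omega)
    simp only [List.nil_append, pvBlocks, List.flatMap_nil] at htb
    have htw := pv_takeWhile_all_append (fun w : String × Int => w.2 == q) g
      (pvBlocks D' C) hgall
    have hblocks : pvBlocks (q :: D') C = (a0, q) :: (g ++ pvBlocks D' C) := by
      simp only [pvBlocks, List.flatMap_cons, hy]
      rfl
    rw [hblocks, dpRun]
    simp only
    have hrun : (g ++ pvBlocks D' C).takeWhile (fun w => w.2 == q) = g := by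
      rw [htw.1]
      rw [show (pvBlocks D' C).takeWhile (fun w : String × Int => w.2 == q) = [] from htb.1]
      simp
    have hrest : (g ++ pvBlocks D' C).dropWhile (fun w => w.2 == q) = pvBlocks D' C := by
      rw [htw.2]
      exact htb.2
    rw [hrun, hrest]
    rw [List.map_cons, List.foldl_cons]
    simp only [hy]
    by_cases hg : g = []
    · subst hg
      simp only [List.map_cons, List.map_nil, List.length_cons, List.length_nil]
      rw [if_pos (by norm_num)]
      rw [ihD (List.pairwise_cons.mp hdesc).2 (fun j hj => hne j (List.mem_cons_of_mem _ hj))]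
      simp [PySem.List.pyGetD_zero_cons]
    · simp only [List.map_cons, List.length_cons, List.length_map]
      rw [if_neg (by
        have := List.length_pos_iff.mpr hg
        push_cast
        omega)]
      rw [ihD (List.pairwise_cons.mp hdesc).2 (fun j hj => hne j (List.mem_cons_of_mem _ hj))]
      have hempty : g.isEmpty = false := by simpa using hg
      rw [hempty]
      simp only [Bool.false_eq_true, if_false]
      congr 1
      · rw [List.foldl_cons, List.foldl_map]
      · push_cast
        ring

-- ===== VERDICT (by name: the statement is the Claim_ definition above) =====
theorem derive_placement_spec : Claim_equal_derive_placement := by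
  intro aps hdom hpre
  unfold Spec_derive_placement
  unfold derive_placement derive_placement_alt
  simp only
  rw [pv_competing_items aps hpre]
  rw [pv_by_pts_items (aps.filter (fun kv => decide (0 < kv.2)))]
  rw [pv_sorted_groups (aps.filter (fun kv => decide (0 < kv.2)))]
  rw [pv_fold_groups_eq_dpRun (aps.filter (fun kv => decide (0 < kv.2)))
      (PySem.List.sorted (PySem.Set.ofList ((aps.filter (fun kv => decide (0 < kv.2))).map Prod.snd)) (fun p => -p) false)
      (pv_sorted_desc _ (PySem.Set.nodup_ofList _))
      (by
        intro p hpmem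
        have hk : p ∈ (PySem.Set.ofList ((aps.filter (fun kv => decide (0 < kv.2))).map Prod.snd) : List Int) :=
          (PySem.List.mem_sorted _ _ _ _).mp hpmem
        have : p ∈ (aps.filter (fun kv => decide (0 < kv.2))).map Prod.snd := (PySem.Set.mem_ofList _ _).mp hk
        obtain ⟨kv, hkv, hsnd⟩ := List.mem_map.mp this
        exact List.ne_nil_of_mem (List.mem_filter.mpr ⟨hkv, by simp [hsnd]⟩))]
  rw [← pv_sorted_eq_blocks]
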